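-- pv_equiv track=rewrite | github.com/elaspic/elaspic | elaspic/database_model.py | _get_unique_resnum_and_sequence
-- ===== SOURCE A (Python) =====
-- def _get_unique_resnum_and_sequence(interactions):
--     """
--     """
--     interacting_resnum = []
--     interacting_aa = ''
--     unique_resnums = set()
--     for interaction in interactions:
--         if interaction[0] not in unique_resnums:
--             unique_resnums.add(interaction[0])
--             interacting_resnum.append(interaction[0])
--             interacting_aa += interaction[1]
--     return interacting_resnum, interacting_aa
-- ===== SOURCE B (Python) =====
-- def _get_unique_resnum_and_sequence(interactions):
--     if not interactions:
--         return [], ''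
--     resnum, aa = interactions[0]
--     rest = [p for p in interactions[1:] if p[0] != resnum]
--     tail_resnums, tail_aa = _get_unique_resnum_and_sequence(rest)
--     return [resnum] + tail_resnums, aa + tail_aa
-- ===== Notes on version B (the rewrite author's own statement) =====
-- stated objective: alternative
-- what changed: Replaces A's single pass with a seen-set and three parallel accumulators by a recursive head-filter dedup: keep the first pair, filter every later pair with the same resnum out of the tail, recurse on the shortened list.
import Mathlib
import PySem

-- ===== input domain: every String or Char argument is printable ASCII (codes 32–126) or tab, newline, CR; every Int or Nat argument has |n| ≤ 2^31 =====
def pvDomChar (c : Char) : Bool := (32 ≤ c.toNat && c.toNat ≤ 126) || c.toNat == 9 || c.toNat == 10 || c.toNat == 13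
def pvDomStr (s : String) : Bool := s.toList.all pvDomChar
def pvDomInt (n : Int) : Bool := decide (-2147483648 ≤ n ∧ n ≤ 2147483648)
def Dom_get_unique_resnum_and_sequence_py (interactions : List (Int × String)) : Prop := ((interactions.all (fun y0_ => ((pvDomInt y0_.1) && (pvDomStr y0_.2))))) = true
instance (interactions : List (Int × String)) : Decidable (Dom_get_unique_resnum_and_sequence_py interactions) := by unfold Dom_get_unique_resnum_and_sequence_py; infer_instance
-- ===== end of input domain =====

-- B replaces A's seen-set single pass by a recursive head-filter dedup (alternative algorithm).

-- ===== PORT A =====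
-- A's loop state: (interacting_resnum, interacting_aa as chars, unique_resnums set)
def get_unique_resnum_and_sequence_py (interactions : List (Int × String)) : List Int × String :=
  let st := interactions.foldl
    (fun (st : List Int × List Char × PySem.Set Int) interaction =>
      if ¬ (PySem.Set.contains st.2.2 interaction.1 = true) then
        (st.1 ++ [interaction.1], st.2.1 ++ interaction.2.toList,
         PySem.Set.add st.2.2 interaction.1)
      else st)
    ([], [], PySem.Set.empty)
  (st.1, String.ofList st.2.1)

-- ===== PORT B =====
-- Source B's recursion; string concatenation is carried as List Char (exact), wrapped once at the top
def pvAltGo : List (Int × String) → List Int × List Char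
  | [] => ([], [])
  | x :: rest =>
    let rest' := rest.filter (fun p => !(p.1 == x.1))
    let t := pvAltGo rest'
    (x.1 :: t.1, x.2.toList ++ t.2)
termination_by l => l.length
decreasing_by
  simp only [List.length_cons]
  exact Nat.lt_succ_of_le (by simpa using List.length_filter_le _ rest.attach)

def get_unique_resnum_and_sequence_py_alt (interactions : List (Int × String)) : List Int × String :=
  let t := pvAltGo interactions
  (t.1, String.ofList t.2)

-- ===== PRECONDITION & SPEC =====
def Spec_get_unique_resnum_and_sequence_py (interactions : List (Int × String)) (out : List Int × String) : Prop := out = get_unique_resnum_and_sequence_py_alt interactions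
instance (interactions : List (Int × String)) (out : List Int × String) : Decidable (Spec_get_unique_resnum_and_sequence_py interactions out) := by unfold Spec_get_unique_resnum_and_sequence_py; infer_instance

-- ===== CLAIM (what is proved, stated in full; the proofs are below) =====
def Claim_equal_get_unique_resnum_and_sequence_py : Prop := ∀ (interactions : List (Int × String)), Dom_get_unique_resnum_and_sequence_py interactions → Spec_get_unique_resnum_and_sequence_py interactions (get_unique_resnum_and_sequence_py interactions)

-- ===== LEMMAS AND PROOFS =====

theorem pvAltGo_nil : pvAltGo [] = ([], []) := by
  unfold pvAltGo
  rfl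

theorem pvAltGo_cons (x : Int × String) (rest : List (Int × String)) :
    pvAltGo (x :: rest)
      = (x.1 :: (pvAltGo (rest.filter (fun p => !(p.1 == x.1)))).1,
         x.2.toList ++ (pvAltGo (rest.filter (fun p => !(p.1 == x.1)))).2) := by
  conv_lhs => unfold pvAltGo

-- abbreviation for A's loop body (proof-local)
def pvStepA (st : List Int × List Char × PySem.Set Int) (interaction : Int × String) :
    List Int × List Char × PySem.Set Int :=
  if ¬ (PySem.Set.contains st.2.2 interaction.1 = true) then
    (st.1 ++ [interaction.1], st.2.1 ++ interaction.2.toList,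
     PySem.Set.add st.2.2 interaction.1)
  else st

-- once k is in the seen set, pairs keyed k are skipped: A's fold ignores them
theorem pv_skip (k : Int) : ∀ (l : List (Int × String)) (st : List Int × List Char × PySem.Set Int),
    k ∈ st.2.2 →
    l.foldl pvStepA st = (l.filter (fun p => !(p.1 == k))).foldl pvStepA st := by
  intro l
  induction l with
  | nil => intro st _; rfl
  | cons p rest ih =>
    intro st hk
    by_cases hpk : p.1 = k
    · have hc : PySem.Set.contains st.2.2 p.1 = true := by
        simp [PySem.Set.contains_eq_listContains, hpk, hk]
      have hm : p.1 ∈ st.2.2 := hpk ▸ hk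
      have hstp : pvStepA st p = st := by simp [pvStepA, hm]
      simp only [List.foldl_cons, List.filter_cons]
      rw [if_neg (by simp [hpk]), hstp]
      exact ih st hk
    · have hmem : k ∈ (pvStepA st p).2.2 := by
        unfold pvStepA
        split
        · simp only []
          unfold PySem.Set.add
          split
          · exact hk
          · simp [hk]
        · exact hk
      simp only [List.foldl_cons, List.filter_cons]
      rw [if_pos (by simp [hpk])]
      simpa using ih (pvStepA st p) hmem

-- main invariant: starting from any state whose seen set misses every key of l,
-- A's fold appends exactly B's recursion result
theorem pv_main : ∀ (n : Nat) (l : List (Int × String)), l.length ≤ n →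
    ∀ (rs : List Int) (cs : List Char) (s : PySem.Set Int),
    (∀ p ∈ l, p.1 ∉ s) →
    l.foldl pvStepA (rs, cs, s)
      = (rs ++ (pvAltGo l).1, cs ++ (pvAltGo l).2, s ++ (pvAltGo l).1) := by
  intro n
  induction n with
  | zero =>
    intro l hl rs cs s _
    have : l = [] := List.eq_nil_of_length_eq_zero (Nat.le_zero.mp hl)
    subst this; simp [pvAltGo_nil]
  | succ m ih =>
    intro l hl rs cs s hs
    cases l with
    | nil => simp [pvAltGo_nil]
    | cons x rest =>
      have hx : x.1 ∉ s := hs x (by simp)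
      have hc : ¬ (PySem.Set.contains s x.1 = true) := by
        simp [PySem.Set.contains_eq_listContains, hx]
      have hadd : PySem.Set.add s x.1 = s ++ [x.1] := by
        unfold PySem.Set.add
        rw [if_neg hc]
      have hstep : pvStepA (rs, cs, s) x
          = (rs ++ [x.1], cs ++ x.2.toList, s ++ [x.1]) := by
        simp [pvStepA, hx]
      have hmem : x.1 ∈ (s ++ [x.1] : List Int) := by simp
      set rest' := rest.filter (fun p => !(p.1 == x.1)) with hrest'
      have hlen : rest'.length ≤ m := by
        rw [hrest']
        have h1 := List.length_filter_le (fun p => !(p.1 == x.1)) rest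
        simp only [List.length_cons] at hl
        omega
      have hs' : ∀ p ∈ rest', p.1 ∉ (s ++ [x.1] : List Int) := by
        intro p hp
        have hpr : p ∈ rest := List.mem_of_mem_filter hp
        have hne : p.1 ≠ x.1 := by
          have := List.of_mem_filter hp
          simpa using this
        have : p.1 ∉ s := hs p (by simp [hpr])
        simp [hne, this]
      have hskip := pv_skip x.1 rest (rs ++ [x.1], cs ++ x.2.toList, s ++ [x.1]) hmem
      have hrec := ih rest' hlen (rs ++ [x.1]) (cs ++ x.2.toList) (s ++ [x.1]) hs'
      have hgo : pvAltGo (x :: rest)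
          = (x.1 :: (pvAltGo rest').1, x.2.toList ++ (pvAltGo rest').2) := by
        rw [pvAltGo_cons, hrest']
      rw [List.foldl_cons, hstep, hskip, hrec, hgo]
      simp

-- ===== VERDICT (by name: the statement is the Claim_ definition above) =====
theorem get_unique_resnum_and_sequence_py_spec : Claim_equal_get_unique_resnum_and_sequence_py := by
  intro interactions _
  unfold Spec_get_unique_resnum_and_sequence_py
  unfold get_unique_resnum_and_sequence_py get_unique_resnum_and_sequence_py_alt
  have h := pv_main interactions.length interactions (le_refl _) [] [] PySem.Set.empty
    (by intro p _; simp [PySem.Set.empty])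
  have hfold : interactions.foldl
      (fun (st : List Int × List Char × PySem.Set Int) interaction =>
        if ¬ (PySem.Set.contains st.2.2 interaction.1 = true) then
          (st.1 ++ [interaction.1], st.2.1 ++ interaction.2.toList,
           PySem.Set.add st.2.2 interaction.1)
        else st)
      ([], [], PySem.Set.empty)
      = interactions.foldl pvStepA ([], [], PySem.Set.empty) := rfl
  simp only [hfold, h, List.nil_append]
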